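-- pv_equiv track=rewrite | github.com/seiichikick0404/coding-problems | practice/B - Rectangle Detection.py | find_col_range
-- ===== SOURCE A (Python) =====
-- def find_col_range(lst):
--     first = -1
--     last = -1
--
--     # リストの要素をループして '#' の位置を見つける
--     for i, element in enumerate(lst):
--         if element == '#':
--             if first == -1:
--                 first = i + 1
--             last = i + 1
--
--     return (first, last)
-- ===== SOURCE B (Python) =====
-- def find_col_range(lst):
--     try:
--         first = lst.index('#') + 1
--     except ValueError:
--         return (-1, -1)
--     last = len(lst) - lst[::-1].index('#')
--     return (first, last)
-- ===== Notes on version B (the rewrite author's own statement) =====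
-- stated objective: idiomatic
-- what changed: Replaces the single accumulating enumerate loop with two separate endpoint searches: list.index from the front for the first '#' and index on the reversed list for the last, with -1,-1 on ValueError.
import Mathlib
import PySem

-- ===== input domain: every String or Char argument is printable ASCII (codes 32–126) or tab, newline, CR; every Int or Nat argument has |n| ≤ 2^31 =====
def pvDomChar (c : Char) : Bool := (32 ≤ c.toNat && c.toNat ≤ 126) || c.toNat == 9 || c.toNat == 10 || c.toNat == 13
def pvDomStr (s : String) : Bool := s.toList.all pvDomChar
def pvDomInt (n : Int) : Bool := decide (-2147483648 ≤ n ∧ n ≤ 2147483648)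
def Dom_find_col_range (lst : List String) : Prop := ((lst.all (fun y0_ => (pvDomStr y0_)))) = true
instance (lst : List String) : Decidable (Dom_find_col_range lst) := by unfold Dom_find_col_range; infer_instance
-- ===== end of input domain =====

-- B replaces A's single accumulating enumerate loop by two independent endpoint
-- searches (index from the front, index on the reversed list from the back); objective: idiomatic.

-- ===== PORT A =====
def find_col_range (lst : List String) : Int × Int :=
  (PySem.List.enumerate lst 0).foldl
    (fun st p =>
      if p.2 = "#" then
        ((if st.1 = -1 then p.1 + 1 else st.1), p.1 + 1)
      else st)
    (-1, -1)

-- ===== PORT B =====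
-- lst[::-1] is ported as List.reverse (PySem.List.slice?_none_none_neg_one: s[::-1] = reverse);
-- the inner .index on the reversed list cannot fail in Source B (a '#' was found), so its
-- Option is read with getD 0 (the default is never used).
def find_col_range_alt (lst : List String) : Int × Int :=
  match PySem.List.index? lst "#" with
  | none => (-1, -1)
  | some i =>
      ((i : Int) + 1,
       (lst.length : Int) - (((PySem.List.index? lst.reverse "#").getD 0 : Nat) : Int))

-- ===== PRECONDITION & SPEC =====
def Spec_find_col_range (lst : List String) (out : Int × Int) : Prop := out = find_col_range_alt lst
instance (lst : List String) (out : Int × Int) : Decidable (Spec_find_col_range lst out) := by unfold Spec_find_col_range; infer_instance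

-- ===== CLAIM (what is proved, stated in full; the proofs are below) =====
def Claim_equal_find_col_range : Prop := ∀ (lst : List String), Dom_find_col_range lst → Spec_find_col_range lst (find_col_range lst)

-- ===== LEMMAS AND PROOFS =====

theorem find_col_range_eq_alt (lst : List String) :
    find_col_range lst = find_col_range_alt lst := by
  induction lst using List.reverseRecOn with
  | nil => rfl
  | append_singleton l x ih =>
      have hfold : find_col_range (l ++ [x]) =
          (fun (st : Int × Int) (p : Int × String) =>
            if p.2 = "#" then
              ((if st.1 = -1 then p.1 + 1 else st.1), p.1 + 1)
            else st) (find_col_range l) ((l.length : Int), x) := by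
        simp [find_col_range, PySem.List.enumerate_append, PySem.List.enumerate_cons,
          PySem.List.enumerate_nil, List.foldl_append]
      rw [hfold, ih]
      by_cases hx : x = "#"
      · subst hx
        rcases h : PySem.List.index? l "#" with _ | i
        · -- '#' not in l
          have hnot : "#" ∉ l := (PySem.List.index?_eq_none_iff _ _).mp h
          have h2 : PySem.List.index? (l ++ ["#"]) "#" = some l.length :=
            PySem.List.index?_append_singleton_self _ _ hnot
          have h3 : PySem.List.index? ("#" :: l.reverse) "#" = some 0 :=
            PySem.List.index?_cons_self _ _
          simp only [find_col_range_alt, List.reverse_append, List.reverse_cons,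
            List.reverse_nil, List.nil_append, List.singleton_append, h, h2, h3]
          simp only [Option.getD_some]
          push_cast
          simp
        · -- '#' in l at index i
          have hmem : "#" ∈ l := (PySem.List.index?_isSome_iff _ _).mp (by rw [h]; rfl)
          have h2 : PySem.List.index? (l ++ ["#"]) "#" = some i := by
            rw [PySem.List.index?_append_of_mem _ hmem]; exact h
          have h3 : PySem.List.index? ("#" :: l.reverse) "#" = some 0 :=
            PySem.List.index?_cons_self _ _
          have hne : ¬ ((i : Int) + 1 = -1) := by omega
          simp only [find_col_range_alt, List.reverse_append, List.reverse_cons,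
            List.reverse_nil, List.nil_append, List.singleton_append, h, h2, h3]
          simp only [Option.getD_some]
          simp [hne]
      · rcases h : PySem.List.index? l "#" with _ | i
        · have hnot : "#" ∉ l := (PySem.List.index?_eq_none_iff _ _).mp h
          have h2 : PySem.List.index? (l ++ [x]) "#" = none := by
            rw [PySem.List.index?_eq_none_iff]
            simp [hnot, Ne.symm hx]
          simp only [find_col_range_alt, h, h2]
          simp [hx]
        · have hmem : "#" ∈ l := (PySem.List.index?_isSome_iff _ _).mp (by rw [h]; rfl)
          have h2 : PySem.List.index? (l ++ [x]) "#" = some i := by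
            rw [PySem.List.index?_append_of_mem _ hmem]; exact h
          have hmemr : "#" ∈ l.reverse := by simpa using hmem
          rcases hr : PySem.List.index? l.reverse "#" with _ | j
          · exact absurd ((PySem.List.index?_eq_none_iff _ _).mp hr) (by simpa using hmemr)
          · have h3 : PySem.List.index? (x :: l.reverse) "#" = some (j + 1) := by
              rw [PySem.List.index?_cons_of_ne _ hx, hr]; rfl
            simp only [find_col_range_alt, List.reverse_append, List.reverse_cons,
              List.reverse_nil, List.nil_append, List.singleton_append, h, h2, h3, hr]
            simp only [Option.getD_some]
            simp [hx]

-- ===== VERDICT (by name: the statement is the Claim_ definition above) =====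
theorem find_col_range_spec : Claim_equal_find_col_range := by
  intro lst _
  unfold Spec_find_col_range
  exact find_col_range_eq_alt lst
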